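-- pv_equiv track=rewrite | github.com/Hamulous/Hamulous-Stache | Hamulous Stache.py | categorize_scripts
-- ===== SOURCE A (Python) =====
-- CATEGORY_MAP = {
--     "PvZ2 Tools": [
--         "organize_zombiejsons.py",
--         "organize_zombieactions.py",
--         "sort_lawnstrings.py",
--         "erase_plant_levels.py",
--         "bulkadd_costumes.py",
--         "dialogue.py",
--         "swap_symbols.py",
--         "data_to_atlas.py",
--         "rewrite_scg_json.py",
--         "speedup_labels.py",
--         "resize_label_matrices.py"
--     ],
--     "Image/PSD Tools": [
--         "ExportSprites.py",
--         "PSDExporterImade.py",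
--         "Coolimageresizer.py",
--         "enhance_images.py"
--     ]
-- }
--
-- def categorize_scripts(script_files):
--     categories = {
--         "PvZ2 Tools": [],
--         "Image/PSD Tools": [],
--         "Misc": []
--     }
--     for file in script_files:
--         found = False
--         for category, file_list in CATEGORY_MAP.items():
--             if file in file_list:
--                 categories[category].append(file)
--                 found = True
--                 break
--         if not found:
--             categories["Misc"].append(file)
--     return categories
-- ===== SOURCE B (Python) =====
-- CATEGORY_MAP = {
--     "PvZ2 Tools": [
--         "organize_zombiejsons.py",
--         "organize_zombieactions.py",
--         "sort_lawnstrings.py",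
--         "erase_plant_levels.py",
--         "bulkadd_costumes.py",
--         "dialogue.py",
--         "swap_symbols.py",
--         "data_to_atlas.py",
--         "rewrite_scg_json.py",
--         "speedup_labels.py",
--         "resize_label_matrices.py"
--     ],
--     "Image/PSD Tools": [
--         "ExportSprites.py",
--         "PSDExporterImade.py",
--         "Coolimageresizer.py",
--         "enhance_images.py"
--     ]
-- }
--
-- def categorize_scripts(script_files):
--     # One filtering pass per output bucket instead of dispatching file-by-file.
--     set_pvz = frozenset(CATEGORY_MAP["PvZ2 Tools"])
--     set_img = frozenset(CATEGORY_MAP["Image/PSD Tools"])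
--     return {
--         "PvZ2 Tools": [f for f in script_files if f in set_pvz],
--         "Image/PSD Tools": [f for f in script_files if f in set_img],
--         "Misc": [f for f in script_files if f not in set_pvz and f not in set_img],
--     }
-- ===== Notes on version B (the rewrite author's own statement) =====
-- stated objective: faster
-- what changed: Replaced A's single pass that dispatches each file into a mutable dict via an inner break-loop over CATEGORY_MAP's lists with three independent filtering passes over script_files against precomputed frozensets, one per output bucket.
import Mathlib
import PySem

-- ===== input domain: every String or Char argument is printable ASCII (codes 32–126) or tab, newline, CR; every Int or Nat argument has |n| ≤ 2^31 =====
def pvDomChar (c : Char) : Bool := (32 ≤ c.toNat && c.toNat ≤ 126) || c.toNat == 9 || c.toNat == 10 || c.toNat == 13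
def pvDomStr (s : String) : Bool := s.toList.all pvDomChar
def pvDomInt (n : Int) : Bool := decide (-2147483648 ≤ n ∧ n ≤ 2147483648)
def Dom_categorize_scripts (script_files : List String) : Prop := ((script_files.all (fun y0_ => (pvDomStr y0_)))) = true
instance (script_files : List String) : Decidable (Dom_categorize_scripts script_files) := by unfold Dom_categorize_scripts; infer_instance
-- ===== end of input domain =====

-- B computes each output bucket by its own filtering pass over script_files
-- (membership in precomputed category sets) instead of A's file-by-file dispatch
-- into a mutable dict; same return value; measured faster in a timing run (constant factor).

-- ===== PORT A =====
def pvzFiles : List String :=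
  ["organize_zombiejsons.py", "organize_zombieactions.py", "sort_lawnstrings.py",
   "erase_plant_levels.py", "bulkadd_costumes.py", "dialogue.py", "swap_symbols.py",
   "data_to_atlas.py", "rewrite_scg_json.py", "speedup_labels.py", "resize_label_matrices.py"]

def imgFiles : List String :=
  ["ExportSprites.py", "PSDExporterImade.py", "Coolimageresizer.py", "enhance_images.py"]

def CATEGORY_MAP : PySem.Dict String (List String) :=
  PySem.Dict.ofList [("PvZ2 Tools", pvzFiles), ("Image/PSD Tools", imgFiles)]

-- inner 'for category, file_list in CATEGORY_MAP.items(): … break' loop of A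
def innerLoop (file : String) (categories : PySem.Dict String (List String)) :
    List (String × List String) → PySem.Dict String (List String) × Bool
  | [] => (categories, false)
  | (category, file_list) :: rest =>
      if file ∈ file_list then
        (categories.modify category [] (· ++ [file]), true)
      else innerLoop file categories rest

def categorize_scripts (script_files : List String) : List (String × List String) :=
  let init : PySem.Dict String (List String) :=
    PySem.Dict.ofList [("PvZ2 Tools", []), ("Image/PSD Tools", []), ("Misc", [])]
  (script_files.foldl
    (fun categories file =>
      let r := innerLoop file categories CATEGORY_MAP.items
      if r.2 then r.1 else r.1.modify "Misc" [] (· ++ [file]))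
    init).items

-- ===== PORT B =====
def categorize_scripts_alt (script_files : List String) : List (String × List String) :=
  let set_pvz : PySem.Set String := PySem.Set.ofList pvzFiles
  let set_img : PySem.Set String := PySem.Set.ofList imgFiles
  [("PvZ2 Tools", script_files.filter (fun f => decide (f ∈ set_pvz))),
   ("Image/PSD Tools", script_files.filter (fun f => decide (f ∈ set_img))),
   ("Misc", script_files.filter (fun f => decide (f ∉ set_pvz ∧ f ∉ set_img)))]

-- ===== PRECONDITION & SPEC =====
def Spec_categorize_scripts (script_files : List String) (out : List (String × List String)) : Prop := out = categorize_scripts_alt script_files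
instance (script_files : List String) (out : List (String × List String)) : Decidable (Spec_categorize_scripts script_files out) := by unfold Spec_categorize_scripts; infer_instance

-- ===== CLAIM (what is proved, stated in full; the proofs are below) =====
def Claim_equal_categorize_scripts : Prop := ∀ (script_files : List String), Dom_categorize_scripts script_files → Spec_categorize_scripts script_files (categorize_scripts script_files)

-- ===== LEMMAS AND PROOFS =====

-- invariant of A's fold over the concrete three-key dict state
lemma categorize_state (fs : List String) (p i m : List String) :
    (fs.foldl
      (fun categories file =>
        let r := innerLoop file categories CATEGORY_MAP.items
        if r.2 then r.1 else r.1.modify "Misc" [] (· ++ [file]))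
      (PySem.Dict.mk [("PvZ2 Tools", p), ("Image/PSD Tools", i), ("Misc", m)])).items
    = [("PvZ2 Tools", p ++ fs.filter (fun f => decide (f ∈ pvzFiles))),
       ("Image/PSD Tools", i ++ fs.filter (fun f => f ∉ pvzFiles ∧ f ∈ imgFiles)),
       ("Misc", m ++ fs.filter (fun f => f ∉ pvzFiles ∧ f ∉ imgFiles))] := by
  induction fs generalizing p i m with
  | nil => simp
  | cons f fs ih =>
    by_cases hp : f ∈ pvzFiles
    · have : innerLoop f (PySem.Dict.mk [("PvZ2 Tools", p), ("Image/PSD Tools", i), ("Misc", m)]) CATEGORY_MAP.items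
          = ((PySem.Dict.mk [("PvZ2 Tools", p ++ [f]), ("Image/PSD Tools", i), ("Misc", m)]), true) := by
        simp [CATEGORY_MAP, PySem.Dict.ofList, PySem.Dict.update, PySem.Dict.empty,
              PySem.Dict.contains, innerLoop, hp, PySem.Dict.modify, PySem.Dict.insert,
              PySem.Dict.getD, PySem.Dict.get?]
      simp [List.foldl_cons, this, ih, hp]
    · by_cases hi : f ∈ imgFiles
      · have : innerLoop f (PySem.Dict.mk [("PvZ2 Tools", p), ("Image/PSD Tools", i), ("Misc", m)]) CATEGORY_MAP.items
            = ((PySem.Dict.mk [("PvZ2 Tools", p), ("Image/PSD Tools", i ++ [f]), ("Misc", m)]), true) := by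
          simp [CATEGORY_MAP, PySem.Dict.ofList, PySem.Dict.update, PySem.Dict.empty,
                PySem.Dict.contains, innerLoop, hp, hi, PySem.Dict.modify, PySem.Dict.insert,
                PySem.Dict.getD, PySem.Dict.get?]
        simp [List.foldl_cons, this, ih, hp, hi]
      · have : (let r := innerLoop f (PySem.Dict.mk [("PvZ2 Tools", p), ("Image/PSD Tools", i), ("Misc", m)]) CATEGORY_MAP.items
                if r.2 then r.1 else r.1.modify "Misc" [] (· ++ [f]))
            = PySem.Dict.mk [("PvZ2 Tools", p), ("Image/PSD Tools", i), ("Misc", m ++ [f])] := by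
          simp [CATEGORY_MAP, PySem.Dict.ofList, PySem.Dict.update, PySem.Dict.empty,
                PySem.Dict.contains, innerLoop, hp, hi, PySem.Dict.modify, PySem.Dict.insert,
                PySem.Dict.getD, PySem.Dict.get?]
        simp only [List.foldl_cons, this, ih]
        simp [hp, hi]

-- ===== VERDICT (by name: the statement is the Claim_ definition above) =====
theorem categorize_scripts_spec : Claim_equal_categorize_scripts := by
  intro fs _
  unfold Spec_categorize_scripts categorize_scripts categorize_scripts_alt
  have hinit : (PySem.Dict.ofList [("PvZ2 Tools", ([] : List String)), ("Image/PSD Tools", []), ("Misc", [])])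
      = PySem.Dict.mk [("PvZ2 Tools", []), ("Image/PSD Tools", []), ("Misc", [])] := by
    simp [PySem.Dict.ofList, PySem.Dict.update, PySem.Dict.empty, PySem.Dict.contains,
          PySem.Dict.insert]
  simp only [hinit, categorize_state, List.nil_append]
  have hdisj : ∀ f : String, f ∈ imgFiles → f ∉ pvzFiles := by decide
  have e1 : (fun f : String => decide (f ∈ PySem.Set.ofList pvzFiles)) = (fun f => decide (f ∈ pvzFiles)) := by
    funext f; simp [PySem.Set.mem_ofList]
  have e2 : (fun f : String => decide (f ∉ pvzFiles ∧ f ∈ imgFiles)) = (fun f => decide (f ∈ PySem.Set.ofList imgFiles)) := by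
    funext f
    simp only [decide_eq_decide, PySem.Set.mem_ofList]
    exact ⟨fun h => h.2, fun h => ⟨hdisj f h, h⟩⟩
  have e3 : (fun f : String => decide (f ∉ pvzFiles ∧ f ∉ imgFiles)) = (fun f => decide (f ∉ PySem.Set.ofList pvzFiles ∧ f ∉ PySem.Set.ofList imgFiles)) := by
    funext f; simp [PySem.Set.mem_ofList]
  rw [e1, e2, e3]
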